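-- pv_equiv track=rewrite | github.com/YonatanLevy97/Intro2CS | ex8/puzzle_solver.py | max_min_seen_down
-- ===== SOURCE A (Python) =====
-- def max_min_seen_down(picture: list[list[int]], row: int, col: int, max_or_min: int) -> int:
--     """
--     :param max_or_min: 0 is for max and 1 is for min
--     :return: return the num of seen cells on the cells below
--     """
--     is_last_row = row >= len(picture)
--     if max_or_min == 0:
--         if is_last_row or picture[row][col] == 0:
--             return 0
--     else:
--         if is_last_row or picture[row][col] != 1:
--             return 0
--     return 1 + max_min_seen_down(picture, row + 1, col, max_or_min)
-- ===== SOURCE B (Python) =====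
-- def max_min_seen_down(picture: list[list[int]], row: int, col: int, max_or_min: int) -> int:
--     """Iterative downward scan: pick the qualifying test once, then count."""
--     qualifies = (lambda v: v != 0) if max_or_min == 0 else (lambda v: v == 1)
--     count = 0
--     while row < len(picture) and qualifies(picture[row][col]):
--         count += 1
--         row += 1
--     return count
-- ===== Notes on version B (the rewrite author's own statement) =====
-- stated objective: simpler
-- what changed: Replaces the tail recursion with a duplicated guard per mode by an iterative while-loop with a running counter and a single qualifying predicate chosen once before the loop.
import Mathlib
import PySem

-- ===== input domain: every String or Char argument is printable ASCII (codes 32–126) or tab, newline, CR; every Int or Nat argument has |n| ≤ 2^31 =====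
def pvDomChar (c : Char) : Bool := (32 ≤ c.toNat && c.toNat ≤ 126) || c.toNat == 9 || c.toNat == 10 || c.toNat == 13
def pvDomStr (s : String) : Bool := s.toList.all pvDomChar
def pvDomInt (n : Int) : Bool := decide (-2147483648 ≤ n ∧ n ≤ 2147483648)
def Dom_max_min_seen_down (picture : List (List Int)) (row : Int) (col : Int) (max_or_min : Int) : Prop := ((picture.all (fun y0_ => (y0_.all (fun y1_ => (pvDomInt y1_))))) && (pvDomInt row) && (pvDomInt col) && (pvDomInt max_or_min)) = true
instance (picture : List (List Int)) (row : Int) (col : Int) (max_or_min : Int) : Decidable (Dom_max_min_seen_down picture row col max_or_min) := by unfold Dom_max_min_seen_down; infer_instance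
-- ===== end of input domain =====

-- B replaces A's tail recursion (guard duplicated per mode) by an iterative scan with a
-- running counter and a qualifying predicate chosen once; objective: simpler, same cost.


-- ===== PORT A =====
-- picture[row][col]; Python raises (pyGet? = none) outside Pre_, where the default 0 is never read
def pvCell (picture : List (List Int)) (row : Int) (col : Int) : Int :=
  ((PySem.List.pyGet? picture row).bind (fun r => PySem.List.pyGet? r col)).getD 0

def max_min_seen_down (picture : List (List Int)) (row : Int) (col : Int) (max_or_min : Int) : Int :=
  if max_or_min = 0 then
    if row ≥ (picture.length : Int) ∨ pvCell picture row col = 0 then 0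
    else 1 + max_min_seen_down picture (row + 1) col max_or_min
  else
    if row ≥ (picture.length : Int) ∨ pvCell picture row col ≠ 1 then 0
    else 1 + max_min_seen_down picture (row + 1) col max_or_min
termination_by ((picture.length : Int) - row).toNat
decreasing_by all_goals simp_all

-- ===== PORT B =====
def pvScan (picture : List (List Int)) (col : Int) (qualifies : Int → Bool)
    (row : Int) (count : Int) : Int :=
  if row < (picture.length : Int) ∧ qualifies (pvCell picture row col) then
    pvScan picture col qualifies (row + 1) (count + 1)
  else count
termination_by ((picture.length : Int) - row).toNat
decreasing_by all_goals simp_all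

def max_min_seen_down_alt (picture : List (List Int)) (row : Int) (col : Int) (max_or_min : Int) : Int :=
  let qualifies : Int → Bool := if max_or_min = 0 then (fun v => v ≠ 0) else (fun v => v = 1)
  pvScan picture col qualifies row 0

-- ===== PRECONDITION & SPEC =====
-- qualifying test of the Python source, as a condition on the input values (used only by Pre_)
def pvQual (max_or_min v : Int) : Bool := if max_or_min = 0 then v != 0 else v == 1

-- "picture[i][col] is a valid Python indexing" (both indices may be negative)
def pvColOK (picture : List (List Int)) (col i : Int) : Bool :=
  match PySem.List.pyGet? picture i with
  | some r => (PySem.List.pyGet? r col).isSome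
  | none => false

-- Pre_ excludes EXACTLY the inputs on which Python A raises IndexError: a start row below
-- -len(picture), or a row actually reached by the downward scan (every earlier scanned row
-- indexable and qualifying) in which picture[i][col] is out of range; on every input in Pre_,
-- A returns normally, and no input on which A returns is excluded.
def Pre_max_min_seen_down (picture : List (List Int)) (row : Int) (col : Int) (max_or_min : Int) : Prop :=
  row ≥ (picture.length : Int) ∨
    (-(picture.length : Int) ≤ row ∧
      ∀ k ∈ List.range ((((picture.length : Int)) - row).toNat),
        (∀ j ∈ List.range k,
            pvColOK picture col (row + j) = true ∧
            pvQual max_or_min (pvCell picture (row + j) col) = true) →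
          pvColOK picture col (row + k) = true)
instance (picture : List (List Int)) (row : Int) (col : Int) (max_or_min : Int) : Decidable (Pre_max_min_seen_down picture row col max_or_min) := by unfold Pre_max_min_seen_down; infer_instance

def pvWitness_max_min_seen_down : List (List Int) × Int × Int × Int := ([[1, 2], [0, 1]], 0, 0, 0)

def Spec_max_min_seen_down (picture : List (List Int)) (row : Int) (col : Int) (max_or_min : Int) (out : Int) : Prop := out = max_min_seen_down_alt picture row col max_or_min
instance (picture : List (List Int)) (row : Int) (col : Int) (max_or_min : Int) (out : Int) : Decidable (Spec_max_min_seen_down picture row col max_or_min out) := by unfold Spec_max_min_seen_down; infer_instance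

-- ===== CLAIM (what is proved, stated in full; the proofs are below) =====
def Claim_equal_max_min_seen_down : Prop := ∀ (picture : List (List Int)) (row : Int) (col : Int) (max_or_min : Int), Dom_max_min_seen_down picture row col max_or_min → Pre_max_min_seen_down picture row col max_or_min → Spec_max_min_seen_down picture row col max_or_min (max_min_seen_down picture row col max_or_min)

-- ===== LEMMAS AND PROOFS =====

-- the loop with accumulator `count` computes `count +` A's recursion, provided `qualifies`
-- matches A's (negated) stop condition for this max_or_min
theorem pvScan_eq_rec (picture : List (List Int)) (col max_or_min : Int)
    (qualifies : Int → Bool)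
    (hq : ∀ v, qualifies v = true ↔ (if max_or_min = 0 then v ≠ 0 else v = 1)) :
    ∀ (n : Nat) (row count : Int), (((picture.length : Int) - row).toNat = n) →
      pvScan picture col qualifies row count
        = count + max_min_seen_down picture row col max_or_min := by
  intro n
  induction n with
  | zero =>
    intro row count h
    have hrow : row ≥ (picture.length : Int) := by omega
    have hng : ¬ (row < (picture.length : Int) ∧ qualifies (pvCell picture row col) = true) := by
      rintro ⟨h1, _⟩; omega
    rw [pvScan, max_min_seen_down, if_neg hng]
    by_cases hm : max_or_min = 0
    · rw [if_pos hm, if_pos (Or.inl hrow)]; ring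
    · rw [if_neg hm, if_pos (Or.inl hrow)]; ring
  | succ n ih =>
    intro row count h
    rw [pvScan, max_min_seen_down]
    by_cases hm : max_or_min = 0
    · rw [if_pos hm]
      by_cases hstop : row ≥ (picture.length : Int) ∨ pvCell picture row col = 0
      · have hng : ¬ (row < (picture.length : Int) ∧ qualifies (pvCell picture row col) = true) := by
          rintro ⟨h1, h2⟩
          have h3 := (hq _).1 h2
          rw [if_pos hm] at h3
          rcases hstop with h4 | h4
          · omega
          · exact h3 h4
        rw [if_neg hng, if_pos hstop]; ring
      · push Not at hstop
        have hg : row < (picture.length : Int) ∧ qualifies (pvCell picture row col) = true :=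
          ⟨by omega, (hq _).2 (by rw [if_pos hm]; exact hstop.2)⟩
        rw [if_pos hg, if_neg (by push Not; exact hstop),
          ih (row + 1) (count + 1) (by omega)]
        ring
    · rw [if_neg hm]
      by_cases hstop : row ≥ (picture.length : Int) ∨ pvCell picture row col ≠ 1
      · have hng : ¬ (row < (picture.length : Int) ∧ qualifies (pvCell picture row col) = true) := by
          rintro ⟨h1, h2⟩
          have h3 := (hq _).1 h2
          rw [if_neg hm] at h3
          rcases hstop with h4 | h4
          · omega
          · exact h4 h3
        rw [if_neg hng, if_pos hstop]; ring
      · push Not at hstop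
        have hg : row < (picture.length : Int) ∧ qualifies (pvCell picture row col) = true :=
          ⟨by omega, (hq _).2 (by rw [if_neg hm]; exact hstop.2)⟩
        rw [if_pos hg, if_neg (by push Not; exact hstop),
          ih (row + 1) (count + 1) (by omega)]
        ring

-- ===== VERDICT (by name: the statement is the Claim_ definition above) =====
theorem max_min_seen_down_spec : Claim_equal_max_min_seen_down := by
  intro picture row col max_or_min _ _
  unfold Spec_max_min_seen_down max_min_seen_down_alt
  by_cases hm : max_or_min = 0
  · simp only [hm, reduceIte]
    rw [pvScan_eq_rec picture col 0 _ (by intro v; simp) _ row 0 rfl]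
    omega
  · simp only [hm, reduceIte]
    rw [pvScan_eq_rec picture col max_or_min _ (by intro v; simp [hm]) _ row 0 rfl]
    omega
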